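-- pv_equiv track=rewrite | github.com/Arnoldisprobablycrazy/jobassist | python-service/ats_optimizer.py | _get_format_tips
-- ===== SOURCE A (Python) =====
-- from typing import Dict, List, Any, Tuple
--
-- def _get_format_tips(issues: List[str], warnings: List[str]) -> List[str]:
--     """Get specific formatting tips based on detected issues."""
--
--     tips = []
--
--     if any('table' in issue.lower() for issue in issues + warnings):
--         tips.append("Replace tables with simple bullet points or line breaks")
--
--     if any('column' in issue.lower() for issue in issues + warnings):
--         tips.append("Use single-column layout for maximum ATS compatibility")
--
--     if any('text box' in issue.lower() for issue in issues + warnings):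
--         tips.append("Remove text boxes - place content in main document flow")
--
--     if any('header' in issue.lower() or 'footer' in issue.lower() for issue in issues + warnings):
--         tips.append("Move contact info from headers/footers to main document body")
--
--     if any('special character' in issue.lower() for issue in issues + warnings):
--         tips.append("Use standard characters: bullets (•), dashes (-), asterisks (*)")
--
--     if not tips:
--         tips.append("Use standard fonts (Arial, Calibri, Times New Roman)")
--         tips.append("Stick to .PDF or .DOCX file formats")
--         tips.append("Use standard section headers (Experience, Education, Skills)")
--
--     return tips
-- ===== SOURCE B (Python) =====
-- _TIP_TABLE = [
--     (("table",), "Replace tables with simple bullet points or line breaks"),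
--     (("column",), "Use single-column layout for maximum ATS compatibility"),
--     (("text box",), "Remove text boxes - place content in main document flow"),
--     (("header", "footer"), "Move contact info from headers/footers to main document body"),
--     (("special character",), "Use standard characters: bullets (\u2022), dashes (-), asterisks (*)"),
-- ]
--
-- _DEFAULT_TIPS = [
--     "Use standard fonts (Arial, Calibri, Times New Roman)",
--     "Stick to .PDF or .DOCX file formats",
--     "Use standard section headers (Experience, Education, Skills)",
-- ]
--
--
-- def _get_format_tips(issues, warnings):
--     """Get specific formatting tips based on detected issues."""
--     present = set()
--     for text in issues + warnings:
--         low = text.lower()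
--         for idx, (keywords, _tip) in enumerate(_TIP_TABLE):
--             if any(kw in low for kw in keywords):
--                 present.add(idx)
--     tips = [tip for idx, (_kws, tip) in enumerate(_TIP_TABLE) if idx in present]
--     return tips if tips else list(_DEFAULT_TIPS)
-- ===== Notes on version B (the rewrite author's own statement) =====
-- stated objective: simpler
-- what changed: A runs five independent emit-on-match scans over issues+warnings (lowercasing every string in each scan); B keeps one ordered keyword->tip table, makes a single pass over issues+warnings lowercasing each string once and collecting matching category indices into a set, then walks the table once to emit the tips in the same canonical order, with the same default-tips fallback.
import Mathlib
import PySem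

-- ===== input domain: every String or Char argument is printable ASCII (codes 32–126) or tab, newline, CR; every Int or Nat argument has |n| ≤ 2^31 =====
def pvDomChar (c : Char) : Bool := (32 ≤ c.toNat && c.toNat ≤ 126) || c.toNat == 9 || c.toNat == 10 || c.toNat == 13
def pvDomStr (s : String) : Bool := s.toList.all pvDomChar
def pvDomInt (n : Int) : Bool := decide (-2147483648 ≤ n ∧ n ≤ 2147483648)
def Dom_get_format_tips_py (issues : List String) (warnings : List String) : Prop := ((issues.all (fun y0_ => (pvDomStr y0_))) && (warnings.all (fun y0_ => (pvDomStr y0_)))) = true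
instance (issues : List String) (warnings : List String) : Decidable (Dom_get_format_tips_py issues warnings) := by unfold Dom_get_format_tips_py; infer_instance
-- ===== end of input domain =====

-- B replaces A's five separate emit-on-match scans with a keyword→tip table, one pass collecting the
-- present categories into a set, then one table walk emitting tips in canonical order (objective: simpler).

-- ===== PORT A =====
def get_format_tips_py (issues : List String) (warnings : List String) : List String :=
  let tips : List String := []
  let tips := if (issues ++ warnings).any (fun issue => PySem.Str.isIn "table" (PySem.Str.lower issue)) then
      tips ++ ["Replace tables with simple bullet points or line breaks"] else tips
  let tips := if (issues ++ warnings).any (fun issue => PySem.Str.isIn "column" (PySem.Str.lower issue)) then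
      tips ++ ["Use single-column layout for maximum ATS compatibility"] else tips
  let tips := if (issues ++ warnings).any (fun issue => PySem.Str.isIn "text box" (PySem.Str.lower issue)) then
      tips ++ ["Remove text boxes - place content in main document flow"] else tips
  let tips := if (issues ++ warnings).any (fun issue => PySem.Str.isIn "header" (PySem.Str.lower issue) || PySem.Str.isIn "footer" (PySem.Str.lower issue)) then
      tips ++ ["Move contact info from headers/footers to main document body"] else tips
  let tips := if (issues ++ warnings).any (fun issue => PySem.Str.isIn "special character" (PySem.Str.lower issue)) then
      tips ++ ["Use standard characters: bullets (•), dashes (-), asterisks (*)"] else tips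
  let tips := if tips = [] then
      tips ++ ["Use standard fonts (Arial, Calibri, Times New Roman)"]
           ++ ["Stick to .PDF or .DOCX file formats"]
           ++ ["Use standard section headers (Experience, Education, Skills)"] else tips
  tips

-- ===== PORT B =====
def pvTipTable : List (List String × String) :=
  [ (["table"], "Replace tables with simple bullet points or line breaks"),
    (["column"], "Use single-column layout for maximum ATS compatibility"),
    (["text box"], "Remove text boxes - place content in main document flow"),
    (["header", "footer"], "Move contact info from headers/footers to main document body"),
    (["special character"], "Use standard characters: bullets (•), dashes (-), asterisks (*)") ]

def pvDefaultTips : List String :=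
  [ "Use standard fonts (Arial, Calibri, Times New Roman)",
    "Stick to .PDF or .DOCX file formats",
    "Use standard section headers (Experience, Education, Skills)" ]

-- body of B's inner loop: scan the table once for one lowered text, recording matching row indices
def pvStep (present : PySem.Set Int) (text : String) : PySem.Set Int :=
  let low := PySem.Str.lower text
  (PySem.List.enumerate pvTipTable).foldl (fun present p =>
      if p.2.1.any (fun kw => PySem.Str.isIn kw low) then PySem.Set.add present p.1
      else present) present

def get_format_tips_py_alt (issues : List String) (warnings : List String) : List String :=
  let present : PySem.Set Int := (issues ++ warnings).foldl pvStep PySem.Set.empty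
  let tips := ((PySem.List.enumerate pvTipTable).filter
      (fun p => PySem.Set.contains present p.1)).map (fun p => p.2.2)
  if tips = [] then pvDefaultTips else tips

-- ===== PRECONDITION & SPEC =====
def Spec_get_format_tips_py (issues : List String) (warnings : List String) (out : List String) : Prop := out = get_format_tips_py_alt issues warnings
instance (issues : List String) (warnings : List String) (out : List String) : Decidable (Spec_get_format_tips_py issues warnings out) := by unfold Spec_get_format_tips_py; infer_instance

-- ===== CLAIM (what is proved, stated in full; the proofs are below) =====
def Claim_equal_get_format_tips_py : Prop := ∀ (issues : List String) (warnings : List String), Dom_get_format_tips_py issues warnings → Spec_get_format_tips_py issues warnings (get_format_tips_py issues warnings)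

-- ===== LEMMAS AND PROOFS =====

-- does the i-th table row match text?
def pvRow (i : Int) (text : String) : Bool :=
  (PySem.List.enumerate pvTipTable).any
    (fun p => i == p.1 && p.2.1.any (fun kw => PySem.Str.isIn kw (PySem.Str.lower text)))

theorem pv_mem_ite_add (c : Bool) (s : PySem.Set Int) (x i : Int) :
    (i ∈ (if c = true then PySem.Set.add s x else s)) ↔ (i ∈ s ∨ (c = true ∧ i = x)) := by
  cases c <;> simp [PySem.Set.mem_add]

theorem pv_mem_step (s : PySem.Set Int) (t : String) (i : Int) :
    i ∈ pvStep s t ↔ i ∈ s ∨ pvRow i t = true := by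
  simp only [pvStep, pvRow, pvTipTable, PySem.List.enumerate, List.foldl, List.any,
    pv_mem_ite_add]
  simp only [Bool.or_false]
  generalize PySem.Str.isIn "table" (PySem.Str.lower t) = c0
  generalize PySem.Str.isIn "column" (PySem.Str.lower t) = c1
  generalize PySem.Str.isIn "text box" (PySem.Str.lower t) = c2
  generalize (PySem.Str.isIn "header" (PySem.Str.lower t) || PySem.Str.isIn "footer" (PySem.Str.lower t)) = c3
  generalize PySem.Str.isIn "special character" (PySem.Str.lower t) = c4
  cases c0 <;> cases c1 <;> cases c2 <;> cases c3 <;> cases c4 <;> simp <;> tauto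

theorem pv_mem_fold (L : List String) (s : PySem.Set Int) (i : Int) :
    i ∈ L.foldl pvStep s ↔ i ∈ s ∨ L.any (fun t => pvRow i t) = true := by
  induction L generalizing s with
  | nil => simp
  | cons t L ih => simp [List.foldl, ih, pv_mem_step, or_assoc]

theorem pv_contains_fold (L : List String) (i : Int) :
    PySem.Set.contains (L.foldl pvStep PySem.Set.empty) i = L.any (fun t => pvRow i t) := by
  rw [Bool.eq_iff_iff, PySem.Set.contains_iff, pv_mem_fold]
  simp [PySem.Set.empty]

theorem pv_row0 (t : String) : pvRow 0 t = PySem.Str.isIn "table" (PySem.Str.lower t) := by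
  simp [pvRow, pvTipTable, PySem.List.enumerate]
theorem pv_row1 (t : String) : pvRow 1 t = PySem.Str.isIn "column" (PySem.Str.lower t) := by
  simp [pvRow, pvTipTable, PySem.List.enumerate]
theorem pv_row2 (t : String) : pvRow 2 t = PySem.Str.isIn "text box" (PySem.Str.lower t) := by
  simp [pvRow, pvTipTable, PySem.List.enumerate]
theorem pv_row3 (t : String) : pvRow 3 t
    = (PySem.Str.isIn "header" (PySem.Str.lower t) || PySem.Str.isIn "footer" (PySem.Str.lower t)) := by
  simp [pvRow, pvTipTable, PySem.List.enumerate]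
theorem pv_row4 (t : String) : pvRow 4 t = PySem.Str.isIn "special character" (PySem.Str.lower t) := by
  simp [pvRow, pvTipTable, PySem.List.enumerate]

-- ===== VERDICT (by name: the statement is the Claim_ definition above) =====
theorem get_format_tips_py_spec : Claim_equal_get_format_tips_py := by
  intro issues warnings _
  show get_format_tips_py issues warnings = get_format_tips_py_alt issues warnings
  unfold get_format_tips_py get_format_tips_py_alt
  simp only [pvTipTable, pvDefaultTips, PySem.List.enumerate, List.filter,
    pv_contains_fold]
  rw [show (fun t => pvRow 0 t) = (fun t => PySem.Str.isIn "table" (PySem.Str.lower t)) from funext pv_row0,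
      show (fun t => pvRow (0+1) t) = (fun t => PySem.Str.isIn "column" (PySem.Str.lower t)) from funext (fun t => pv_row1 t),
      show (fun t => pvRow (0+1+1) t) = (fun t => PySem.Str.isIn "text box" (PySem.Str.lower t)) from funext (fun t => pv_row2 t),
      show (fun t => pvRow (0+1+1+1) t) = (fun t => PySem.Str.isIn "header" (PySem.Str.lower t) || PySem.Str.isIn "footer" (PySem.Str.lower t)) from funext (fun t => pv_row3 t),
      show (fun t => pvRow (0+1+1+1+1) t) = (fun t => PySem.Str.isIn "special character" (PySem.Str.lower t)) from funext (fun t => pv_row4 t)]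
  generalize (issues ++ warnings).any (fun t => PySem.Str.isIn "table" (PySem.Str.lower t)) = b0
  generalize (issues ++ warnings).any (fun t => PySem.Str.isIn "column" (PySem.Str.lower t)) = b1
  generalize (issues ++ warnings).any (fun t => PySem.Str.isIn "text box" (PySem.Str.lower t)) = b2
  generalize (issues ++ warnings).any (fun t => PySem.Str.isIn "header" (PySem.Str.lower t) || PySem.Str.isIn "footer" (PySem.Str.lower t)) = b3
  generalize (issues ++ warnings).any (fun t => PySem.Str.isIn "special character" (PySem.Str.lower t)) = b4
  cases b0 <;> cases b1 <;> cases b2 <;> cases b3 <;> cases b4 <;> rfl
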